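-- pv_equiv track=rewrite | github.com/edomonndo/python-library | library_checker/tree/cartesian_tree.test.py | cartesian_tree
-- ===== SOURCE A (Python) =====
-- def cartesian_tree(LIST: list) -> list:
--     n = len(LIST)
--     parent = [-1] * n
--     stack = []
--     for i in range(n):
--         prv_i = -1
--         while stack and LIST[i] < LIST[stack[-1]]:
--             prv_i = stack.pop()
--         if prv_i != -1:
--             parent[prv_i] = i
--         if stack:
--             parent[i] = stack[-1]
--         stack.append(i)
--     return parent
-- ===== SOURCE B (Python) =====
-- def cartesian_tree(LIST: list) -> list:
--     n = len(LIST)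
--
--     def left(i):
--         # nearest j < i with LIST[j] <= LIST[i]
--         for j in range(i - 1, -1, -1):
--             if LIST[j] <= LIST[i]:
--                 return j
--         return None
--
--     def right(i):
--         # nearest k > i with LIST[k] < LIST[i]
--         for k in range(i + 1, n):
--             if LIST[k] < LIST[i]:
--                 return k
--         return None
--
--     res = []
--     for i in range(n):
--         l, r = left(i), right(i)
--         if r is not None and (l is None or LIST[l] <= LIST[r]):
--             res.append(r)
--         elif l is not None:
--             res.append(l)
--         else:
--             res.append(-1)
--     return res
-- ===== Notes on version B (the rewrite author's own statement) =====
-- stated objective: alternative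
-- what changed: Replaces A's single online monotonic-stack sweep (with in-place parent reassignment on pops) by a pointwise characterization: for each i, scan directly for the nearest left index with value <= LIST[i] and the nearest right index with value < LIST[i], and pick the neighbour with the larger value (breaking ties toward the right one).
import Mathlib
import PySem

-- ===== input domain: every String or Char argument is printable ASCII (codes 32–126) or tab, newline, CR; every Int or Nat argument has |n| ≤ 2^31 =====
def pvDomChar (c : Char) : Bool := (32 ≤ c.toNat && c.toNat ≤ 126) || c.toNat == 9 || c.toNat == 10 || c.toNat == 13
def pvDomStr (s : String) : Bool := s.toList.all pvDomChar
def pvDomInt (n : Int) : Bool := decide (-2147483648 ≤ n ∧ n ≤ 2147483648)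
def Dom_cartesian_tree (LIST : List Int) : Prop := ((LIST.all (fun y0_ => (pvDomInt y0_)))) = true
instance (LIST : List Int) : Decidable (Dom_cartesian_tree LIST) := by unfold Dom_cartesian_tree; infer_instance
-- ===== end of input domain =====

-- B replaces A's online monotonic-stack sweep by direct nearest-smaller-neighbour scans
-- combined pointwise (objective: alternative decomposition; not faster).

-- ===== PORT A =====
-- Indices are always in range in the Python, so list indexing is ported with getD.
def pvAt (LIST : List Int) (j : Nat) : Int := LIST.getD j 0

-- the inner `while stack and LIST[i] < LIST[stack[-1]]: prv_i = stack.pop()` loop;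
-- stack is head-first (head = Python's stack[-1]); returns (prv_i as Option, remaining stack)
def pvPopWhile (LIST : List Int) (i : Nat) : List Nat → Option Nat × List Nat
  | [] => (none, [])
  | t :: rest =>
    if pvAt LIST i < pvAt LIST t then
      let r := pvPopWhile LIST i rest
      (some (r.1.getD t), r.2)
    else (none, t :: rest)

-- one iteration of A's `for i in range(n)` body
def pvStep (LIST : List Int) (st : List Int × List Nat) (i : Nat) : List Int × List Nat :=
  let prv := (pvPopWhile LIST i st.2).1
  let stack' := (pvPopWhile LIST i st.2).2
  let parent1 := match prv with
    | some p => st.1.set p (i : Int)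
    | none => st.1
  let parent2 := match stack' with
    | t :: _ => parent1.set i (t : Int)
    | [] => parent1
  (parent2, i :: stack')

def cartesian_tree (LIST : List Int) : List Int :=
  ((List.range LIST.length).foldl (pvStep LIST) (List.replicate LIST.length (-1), [])).1

-- ===== PORT B =====
-- B's `left(i)`: first j in range(i-1, -1, -1) with LIST[j] <= LIST[i]
def pvLeft (LIST : List Int) (i : Nat) : Option Nat :=
  (List.range i).reverse.find? (fun j => decide (pvAt LIST j ≤ pvAt LIST i))

-- B's `right(i)`: first k in range(i+1, n) with LIST[k] < LIST[i]
def pvRight (LIST : List Int) (i : Nat) : Option Nat :=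
  (List.range' (i + 1) (LIST.length - (i + 1))).find? (fun k => decide (pvAt LIST k < pvAt LIST i))

-- B's if/elif/else combining the two neighbours
def pvCombine (LIST : List Int) (l r : Option Nat) : Int :=
  match r with
  | some rr =>
    match l with
    | some ll => if pvAt LIST ll ≤ pvAt LIST rr then (rr : Int) else (ll : Int)
    | none => (rr : Int)
  | none =>
    match l with
    | some ll => (ll : Int)
    | none => -1

def cartesian_tree_alt (LIST : List Int) : List Int :=
  (List.range LIST.length).map (fun i => pvCombine LIST (pvLeft LIST i) (pvRight LIST i))

-- ===== PRECONDITION & SPEC =====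
def Spec_cartesian_tree (LIST : List Int) (out : List Int) : Prop := out = cartesian_tree_alt LIST
instance (LIST : List Int) (out : List Int) : Decidable (Spec_cartesian_tree LIST out) := by unfold Spec_cartesian_tree; infer_instance

-- ===== CLAIM (what is proved, stated in full; the proofs are below) =====
def Claim_equal_cartesian_tree : Prop := ∀ (LIST : List Int), Dom_cartesian_tree LIST → Spec_cartesian_tree LIST (cartesian_tree LIST)

-- ===== LEMMAS AND PROOFS =====

-- `j` is on the stack after the prefix of length `i` has been processed
abbrev pvPred (LIST : List Int) (i j : Nat) : Prop := ∀ k < i, j < k → pvAt LIST j ≤ pvAt LIST k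

-- the stack after processing indices 0..i-1, head-first (head = top)
def pvS (LIST : List Int) (i : Nat) : List Nat :=
  ((List.range i).filter (fun j => decide (pvPred LIST i j))).reverse

def pvLopt : Option Nat → Int
  | some l => (l : Int)
  | none => -1

-- the parent array after processing indices 0..i-1, as a function of j
def pvFpre (LIST : List Int) (i j : Nat) : Int :=
  if j < i then
    match pvRight LIST j with
    | some r => if r < i then pvCombine LIST (pvLeft LIST j) (some r) else pvLopt (pvLeft LIST j)
    | none => pvLopt (pvLeft LIST j)
  else -1

def pvPar (LIST : List Int) (i : Nat) : List Int :=
  (List.range LIST.length).map (pvFpre LIST i)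

lemma popWhile_eq (LIST : List Int) (i : Nat) (s : List Nat) :
    pvPopWhile LIST i s =
      (((s.takeWhile (fun t => decide (pvAt LIST i < pvAt LIST t))).getLast?),
        s.dropWhile (fun t => decide (pvAt LIST i < pvAt LIST t))) := by
  induction s with
  | nil => rfl
  | cons t rest ih =>
    by_cases h : pvAt LIST i < pvAt LIST t
    · simp only [pvPopWhile, ih, List.takeWhile_cons, decide_eq_true_eq, h, if_true,
        List.dropWhile_cons]
      rw [Prod.mk.injEq]
      refine ⟨?_, rfl⟩
      rw [List.getLast?_cons]
    · simp [pvPopWhile, h]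

lemma find?_eq_some_pw {q : Nat → Bool} {r : Nat → Nat → Prop} {l : List Nat} {m : Nat}
    (hpw : l.Pairwise r) (hm : m ∈ l) (hq : q m = true)
    (hprev : ∀ y ∈ l, r y m → q y = false) : l.find? q = some m := by
  induction l with
  | nil => cases hm
  | cons t rest ih =>
    rcases List.pairwise_cons.1 hpw with ⟨ht, hrest⟩
    rcases List.mem_cons.1 hm with rfl | hm'
    · simp [List.find?_cons, hq]
    · have hqt : q t = false := hprev t (List.mem_cons_self) (ht m hm')
      simp only [List.find?_cons, hqt, cond_false]
      exact ih hrest hm' (fun y hy hr => hprev y (List.mem_cons_of_mem _ hy) hr)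

lemma find?_cases_pw {q : Nat → Bool} {r : Nat → Nat → Prop} {l : List Nat} {m : Nat}
    (hpw : l.Pairwise r) (hf : l.find? q = some m) :
    ∀ y ∈ l, q y = false ∨ y = m ∨ r m y := by
  induction l with
  | nil => intro y hy; cases hy
  | cons t rest ih =>
    rcases List.pairwise_cons.1 hpw with ⟨ht, hrest⟩
    intro y hy
    by_cases hqt : q t = true
    · have hmt : m = t := by
        have : some t = some m := by simpa [List.find?_cons, hqt] using hf
        exact (Option.some.inj this).symm
      subst hmt
      rcases List.mem_cons.1 hy with rfl | hy'
      · exact Or.inr (Or.inl rfl)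
      · exact Or.inr (Or.inr (ht y hy'))
    · have hf' : rest.find? q = some m := by
        simpa [List.find?_cons, Bool.eq_false_iff.2 hqt] using hf
      rcases List.mem_cons.1 hy with rfl | hy'
      · exact Or.inl (Bool.eq_false_iff.2 hqt)
      · exact ih hrest hf' y hy'

lemma mem_pvS (LIST : List Int) (i j : Nat) :
    j ∈ pvS LIST i ↔ j < i ∧ pvPred LIST i j := by
  simp [pvS, List.mem_filter, List.mem_range]

lemma pvS_sorted (LIST : List Int) (i : Nat) :
    (pvS LIST i).Pairwise (fun x y => y < x) := by
  unfold pvS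
  exact (List.pairwise_reverse).2 ((List.pairwise_lt_range).filter _)

lemma pvS_val_pairwise (LIST : List Int) (i : Nat) :
    (pvS LIST i).Pairwise (fun x y => y < x ∧ pvAt LIST y ≤ pvAt LIST x) := by
  refine List.Pairwise.imp_of_mem ?_ (pvS_sorted LIST i)
  intro x y hx hy hxy
  refine ⟨hxy, ?_⟩
  obtain ⟨hyi, hpy⟩ := (mem_pvS LIST i y).1 hy
  obtain ⟨hxi, _⟩ := (mem_pvS LIST i x).1 hx
  exact hpy x hxi hxy

lemma takeWhile_eq_filter_pw {α : Type} {c : α → Bool} :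
    ∀ {l : List α}, l.Pairwise (fun x y => c y = true → c x = true) →
      l.takeWhile c = l.filter c := by
  intro l hpw
  induction l with
  | nil => rfl
  | cons t rest ih =>
    rcases List.pairwise_cons.1 hpw with ⟨ht, hrest⟩
    by_cases hc : c t = true
    · simp [List.takeWhile_cons, List.filter_cons, hc, ih hrest]
    · have hcf : c t = false := Bool.eq_false_iff.2 hc
      have hall : ∀ y ∈ rest, ¬ c y = true := fun y hy h2 => hc (ht y hy h2)
      simp only [List.takeWhile_cons, hcf, List.filter_cons, cond_false, Bool.false_eq_true,
        if_false]
      exact (List.filter_eq_nil_iff.2 hall).symm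

lemma dropWhile_eq_filter_pw {α : Type} {c : α → Bool} :
    ∀ {l : List α}, l.Pairwise (fun x y => c y = true → c x = true) →
      l.dropWhile c = l.filter (fun x => !c x) := by
  intro l hpw
  induction l with
  | nil => rfl
  | cons t rest ih =>
    rcases List.pairwise_cons.1 hpw with ⟨ht, hrest⟩
    by_cases hc : c t = true
    · simp [List.dropWhile_cons, List.filter_cons, hc, ih hrest]
    · have hcf : c t = false := Bool.eq_false_iff.2 hc
      have hall : ∀ y ∈ rest, (fun x => !c x) y = true := by
        intro y hy
        simp [Bool.eq_false_iff.2 (fun h2 => hc (ht y hy h2))]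
      simp only [List.dropWhile_cons, hcf, List.filter_cons, Bool.false_eq_true, if_false,
        Bool.not_false, if_true]
      exact congrArg (List.cons t) (List.filter_eq_self.mpr hall).symm

lemma pvS_succ (LIST : List Int) (i : Nat) :
    pvS LIST (i + 1) = i :: (pvS LIST i).filter (fun j => !decide (pvAt LIST i < pvAt LIST j)) := by
  unfold pvS
  rw [List.range_succ, List.filter_append]
  have hti : pvPred LIST (i + 1) i := by intro k hk hik; omega
  have h1 : (List.filter (fun j => decide (pvPred LIST (i + 1) j)) [i]) = [i] := by
    simpa using hti
  rw [h1, List.reverse_append, List.reverse_singleton, List.singleton_append]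
  congr 1
  rw [← List.filter_reverse, ← List.filter_reverse, List.filter_filter]
  refine List.filter_congr ?_
  intro j hj
  simp only [List.mem_reverse, List.mem_range] at hj
  have : pvPred LIST (i + 1) j ↔ (¬ pvAt LIST i < pvAt LIST j) ∧ pvPred LIST i j := by
    constructor
    · intro hp
      refine ⟨not_lt.2 (hp i (by omega) hj), ?_⟩
      intro k hk hjk
      exact hp k (by omega) hjk
    · rintro ⟨h1, h2⟩
      intro k hk hjk
      rcases Nat.lt_succ_iff_lt_or_eq.1 hk with h | h
      · exact h2 k h hjk
      · subst h; exact not_lt.1 h1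
  simp [this]
  rw [show (decide (pvAt LIST j ≤ pvAt LIST i)) = !decide (pvAt LIST i < pvAt LIST j) by
    rw [← decide_not]; exact decide_eq_decide.2 not_lt.symm]

lemma nearest_mem_pvS (LIST : List Int) {i j y : Nat}
    (hji : j < i) (hja : pvPred LIST i j) (hy : y < j) (hya : pvAt LIST y ≤ pvAt LIST j) :
    ∃ l, y ≤ l ∧ l < j ∧ l ∈ pvS LIST i := by
  induction hd : j - y using Nat.strong_induction_on generalizing y with
  | _ d ih =>
    by_cases hex : ∃ k, y < k ∧ k < j ∧ pvAt LIST k ≤ pvAt LIST j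
    · obtain ⟨k, hk1, hk2, hk3⟩ := hex
      obtain ⟨l, hl1, hl2, hl3⟩ := ih (j - k) (by omega) hk2 hk3 rfl
      exact ⟨l, by omega, hl2, hl3⟩
    · push_neg at hex
      refine ⟨y, le_refl _, hy, (mem_pvS LIST i y).2 ⟨by omega, ?_⟩⟩
      intro k hk hyk
      rcases lt_trichotomy k j with h | h | h
      · exact le_trans hya (le_of_lt (hex k hyk h))
      · subst h; exact hya
      · exact le_trans hya (hja k hk h)

lemma L_eq_next (LIST : List Int) {i j : Nat} (hj : j ∈ pvS LIST i) :
    pvLeft LIST j = (pvS LIST i).find? (fun y => decide (y < j)) := by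
  obtain ⟨hji, hpredj⟩ := (mem_pvS LIST i j).1 hj
  cases hf : (pvS LIST i).find? (fun y => decide (y < j)) with
  | none =>
    rw [List.find?_eq_none] at hf
    unfold pvLeft
    rw [List.find?_eq_none]
    intro y hy
    simp only [List.mem_reverse, List.mem_range] at hy
    simp only [decide_eq_true_eq]
    intro hya
    obtain ⟨l, _, hlj, hlS⟩ := nearest_mem_pvS LIST hji hpredj hy hya
    exact hf l hlS (by simpa using hlj)
  | some m =>
    have hm := List.mem_of_find?_eq_some hf
    have hqm : m < j := by simpa using List.find?_some hf
    obtain ⟨hmi, hpredm⟩ := (mem_pvS LIST i m).1 hm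
    unfold pvLeft
    apply find?_eq_some_pw (r := fun x y => y < x)
    · exact (List.pairwise_reverse).2 List.pairwise_lt_range
    · simp only [List.mem_reverse, List.mem_range]; exact hqm
    · simp only [decide_eq_true_eq]
      exact hpredm j hji hqm
    · intro y hy hmy
      simp only [List.mem_reverse, List.mem_range] at hy
      simp only [decide_eq_false_iff_not, not_le]
      by_contra hcon
      push_neg at hcon
      obtain ⟨l, hyl, hlj, hlS⟩ := nearest_mem_pvS LIST hji hpredj hy hcon
      have hml : m < l := by omega
      rcases find?_cases_pw (pvS_sorted LIST i) hf l hlS with h | h | h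
      · simp only [decide_eq_false_iff_not] at h; exact h hlj
      · omega
      · omega

lemma R_eq_some (LIST : List Int) {i j : Nat} (hji : j < i) (hp : pvPred LIST i j)
    (hlt : pvAt LIST i < pvAt LIST j) (hin : i < LIST.length) :
    pvRight LIST j = some i := by
  unfold pvRight
  apply find?_eq_some_pw (r := fun x y => x < y)
  · exact List.pairwise_lt_range'
  · simp only [List.mem_range'_1]; omega
  · simp only [decide_eq_true_eq]; exact hlt
  · intro y hy hyi
    simp only [List.mem_range'_1] at hy
    simp only [decide_eq_false_iff_not, not_lt]
    exact hp y hyi (by omega)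

lemma getLast?_min_pw {l : List Nat} {p : Nat} (hpw : l.Pairwise (fun x y => y < x))
    (hl : l.getLast? = some p) : ∀ y ∈ l, p ≤ y := by
  induction l with
  | nil => simp at hl
  | cons t rest ih =>
    cases rest with
    | nil =>
      simp only [List.getLast?_singleton, Option.some.injEq] at hl
      subst hl
      intro y hy
      simp only [List.mem_singleton] at hy
      omega
    | cons u v =>
      rw [List.getLast?_cons_cons] at hl
      rcases List.pairwise_cons.1 hpw with ⟨ht, hrest⟩
      have hmin := ih hrest hl
      intro y hy
      rcases List.mem_cons.1 hy with rfl | hy'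
      · have hpmem : p ∈ u :: v := List.mem_of_getLast? hl
        exact le_of_lt (ht p hpmem)
      · exact hmin y hy'

-- the pop condition of A's inner while loop at step i
def pvC (LIST : List Int) (i : Nat) : Nat → Bool := fun t => decide (pvAt LIST i < pvAt LIST t)

lemma step_spec (LIST : List Int) (i : Nat) (hi : i < LIST.length) :
    pvStep LIST (pvPar LIST i, pvS LIST i) i = (pvPar LIST (i + 1), pvS LIST (i + 1)) := by
  have himp : (pvS LIST i).Pairwise (fun x y => pvC LIST i y = true → pvC LIST i x = true) := by
    refine List.Pairwise.imp ?_ (pvS_val_pairwise LIST i)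
    intro x y hxy hcy
    simp only [pvC, decide_eq_true_eq] at hcy ⊢
    exact lt_of_lt_of_le hcy hxy.2
  have htw : (pvS LIST i).takeWhile (pvC LIST i) = (pvS LIST i).filter (pvC LIST i) :=
    takeWhile_eq_filter_pw himp
  have hdw : (pvS LIST i).dropWhile (pvC LIST i) =
      (pvS LIST i).filter (fun x => !pvC LIST i x) := dropWhile_eq_filter_pw himp
  have hS1 : pvS LIST (i + 1) = i :: (pvS LIST i).dropWhile (pvC LIST i) := by
    rw [pvS_succ, hdw]
    simp [pvC]
  have htwpw : ((pvS LIST i).takeWhile (pvC LIST i)).Pairwise (fun x y => y < x) := by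
    rw [htw]; exact (pvS_sorted LIST i).filter _
  have hdwmem : ∀ t, t ∈ (pvS LIST i).dropWhile (pvC LIST i) →
      t ∈ pvS LIST i ∧ pvC LIST i t = false := by
    intro t ht
    rw [hdw] at ht
    rcases List.mem_filter.1 ht with ⟨h1, h2⟩
    exact ⟨h1, by simpa using h2⟩
  have htwmem : ∀ j, j ∈ (pvS LIST i).takeWhile (pvC LIST i) →
      j ∈ pvS LIST i ∧ pvC LIST i j = true := by
    intro j hjm
    rw [htw] at hjm
    exact List.mem_filter.1 hjm
  have hpopped : ∀ j, j ∈ (pvS LIST i).takeWhile (pvC LIST i) ↔ pvRight LIST j = some i := by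
    intro j
    constructor
    · intro hjm
      obtain ⟨hjS, hcj⟩ := htwmem j hjm
      obtain ⟨hji, hpj⟩ := (mem_pvS LIST i j).1 hjS
      exact R_eq_some LIST hji hpj (by simpa [pvC] using hcj) hi
    · intro hR
      have hmem := List.mem_of_find?_eq_some hR
      simp only [List.mem_range'_1] at hmem
      have hji : j < i := by omega
      have hq : pvAt LIST i < pvAt LIST j := by simpa using List.find?_some hR
      have hpj : pvPred LIST i j := by
        intro k hk hjk
        have hkmem : k ∈ List.range' (j + 1) (LIST.length - (j + 1)) := by
          simp only [List.mem_range'_1]; omega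
        rcases find?_cases_pw (r := fun x y => x < y) List.pairwise_lt_range' hR k hkmem
          with h | h | h
        · simp only [decide_eq_false_iff_not, not_lt] at h; exact h
        · omega
        · omega
      rw [htw]
      exact List.mem_filter.2 ⟨(mem_pvS LIST i j).2 ⟨hji, hpj⟩, by simp [pvC, hq]⟩
  -- the new index i gets as parent the top of the remaining stack (or -1)
  have hP1 : pvFpre LIST (i + 1) i =
      (match (pvS LIST i).dropWhile (pvC LIST i) with
        | t :: _ => (t : Int)
        | [] => -1) := by
    have hiS : i ∈ pvS LIST (i + 1) := by rw [hS1]; exact List.mem_cons_self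
    have hFL : pvFpre LIST (i + 1) i = pvLopt (pvLeft LIST i) := by
      unfold pvFpre
      rw [if_pos (Nat.lt_succ_self i)]
      cases hr : pvRight LIST i with
      | none => rfl
      | some r =>
        have hmem := List.mem_of_find?_eq_some hr
        simp only [List.mem_range'_1] at hmem
        show (if r < i + 1 then pvCombine LIST (pvLeft LIST i) (some r)
            else pvLopt (pvLeft LIST i)) = pvLopt (pvLeft LIST i)
        rw [if_neg (by omega)]
    rw [hFL, L_eq_next LIST hiS, hS1]
    cases hd : (pvS LIST i).dropWhile (pvC LIST i) with
    | nil => simp [List.find?_cons, pvLopt]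
    | cons t rest =>
      have htlt : t < i :=
        ((mem_pvS LIST i t).1 (hdwmem t (by rw [hd]; exact List.mem_cons_self)).1).1
      simp [List.find?_cons, htlt, pvLopt]
  -- the bottommost popped index gets parent i
  have hP3 : ∀ p, ((pvS LIST i).takeWhile (pvC LIST i)).getLast? = some p →
      pvFpre LIST (i + 1) p = (i : Int) := by
    intro p hlast
    have hptw : p ∈ (pvS LIST i).takeWhile (pvC LIST i) := List.mem_of_getLast? hlast
    have hR : pvRight LIST p = some i := (hpopped p).1 hptw
    obtain ⟨hpS, hcp⟩ := htwmem p hptw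
    obtain ⟨hpi, _⟩ := (mem_pvS LIST i p).1 hpS
    have hLp := L_eq_next LIST hpS
    unfold pvFpre
    rw [if_pos (by omega), hR]
    show (if i < i + 1 then pvCombine LIST (pvLeft LIST p) (some i)
        else pvLopt (pvLeft LIST p)) = (i : Int)
    rw [if_pos (Nat.lt_succ_self i), hLp]
    cases hf : (pvS LIST i).find? (fun y => decide (y < p)) with
    | none => rfl
    | some l =>
      have hlS := List.mem_of_find?_eq_some hf
      have hlp : l < p := by simpa using List.find?_some hf
      have hcl : pvC LIST i l = false := by
        by_cases hcl2 : pvC LIST i l = true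
        · exfalso
          have hltw : l ∈ (pvS LIST i).takeWhile (pvC LIST i) := by
            rw [htw]; exact List.mem_filter.2 ⟨hlS, hcl2⟩
          exact absurd (getLast?_min_pw htwpw hlast l hltw) (by omega)
        · exact Bool.eq_false_iff.2 hcl2
      have hle : pvAt LIST l ≤ pvAt LIST i := by
        simpa [pvC, not_lt] using hcl
      show pvCombine LIST (some l) (some i) = (i : Int)
      simp [pvCombine, hle]
  -- a popped index that is not the bottommost keeps its parent value
  have hP4 : ∀ j, j ∈ (pvS LIST i).takeWhile (pvC LIST i) →
      ((pvS LIST i).takeWhile (pvC LIST i)).getLast? ≠ some j →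
      pvFpre LIST (i + 1) j = pvFpre LIST i j := by
    intro j hjtw hnotlast
    have hR : pvRight LIST j = some i := (hpopped j).1 hjtw
    obtain ⟨hjS, hcj⟩ := htwmem j hjtw
    obtain ⟨hji, hpj⟩ := (mem_pvS LIST i j).1 hjS
    obtain ⟨p, hlast⟩ : ∃ p, ((pvS LIST i).takeWhile (pvC LIST i)).getLast? = some p := by
      have hne : (pvS LIST i).takeWhile (pvC LIST i) ≠ [] := List.ne_nil_of_mem hjtw
      exact Option.isSome_iff_exists.1 (List.getLast?_isSome.2 hne)
    have hptw : p ∈ (pvS LIST i).takeWhile (pvC LIST i) := List.mem_of_getLast? hlast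
    obtain ⟨hpS, hcp⟩ := htwmem p hptw
    have hplej : p ≤ j := getLast?_min_pw htwpw hlast j hjtw
    have hplt : p < j := lt_of_le_of_ne hplej (fun h => hnotlast (h ▸ hlast))
    have hfs : ((pvS LIST i).find? (fun y => decide (y < j))).isSome := by
      rw [List.find?_isSome]
      exact ⟨p, hpS, by simpa using hplt⟩
    obtain ⟨l, hf⟩ := Option.isSome_iff_exists.1 hfs
    have hlS := List.mem_of_find?_eq_some hf
    have hlj : l < j := by simpa using List.find?_some hf
    have hpl : p ≤ l := by
      rcases find?_cases_pw (pvS_sorted LIST i) hf p hpS with h | h | h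
      · simp only [decide_eq_false_iff_not] at h; omega
      · omega
      · omega
    have hcl : pvC LIST i l = true := by
      by_cases hcl2 : pvC LIST i l = true
      · exact hcl2
      · exfalso
        have hldw : l ∈ (pvS LIST i).dropWhile (pvC LIST i) := by
          rw [hdw]
          exact List.mem_filter.2 ⟨hlS, by simp [Bool.eq_false_iff.2 hcl2]⟩
        have hsplit := List.takeWhile_append_dropWhile (p := pvC LIST i) (l := pvS LIST i)
        have hpw2 : (((pvS LIST i).takeWhile (pvC LIST i)) ++
            ((pvS LIST i).dropWhile (pvC LIST i))).Pairwise (fun x y => y < x) := by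
          rw [hsplit]; exact pvS_sorted LIST i
        have := (List.pairwise_append.1 hpw2).2.2 p hptw l hldw
        omega
    have hai : pvAt LIST i < pvAt LIST l := by simpa [pvC] using hcl
    have hLj := L_eq_next LIST hjS
    have lhs : pvFpre LIST (i + 1) j = (l : Int) := by
      unfold pvFpre
      rw [if_pos (by omega), hR]
      show (if i < i + 1 then pvCombine LIST (pvLeft LIST j) (some i)
          else pvLopt (pvLeft LIST j)) = (l : Int)
      rw [if_pos (Nat.lt_succ_self i), hLj, hf]
      show pvCombine LIST (some l) (some i) = (l : Int)
      simp [pvCombine, not_le.2 hai]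
    have rhs : pvFpre LIST i j = (l : Int) := by
      unfold pvFpre
      rw [if_pos hji, hR]
      show (if i < i then pvCombine LIST (pvLeft LIST j) (some i)
          else pvLopt (pvLeft LIST j)) = (l : Int)
      rw [if_neg (lt_irrefl i), hLj, hf]
      rfl
    rw [lhs, rhs]
  -- entries whose right neighbour is not i are unchanged
  have hP5 : ∀ j, j ≠ i → pvRight LIST j ≠ some i →
      pvFpre LIST (i + 1) j = pvFpre LIST i j := by
    intro j hjne hne
    by_cases hji : j < i
    · unfold pvFpre
      rw [if_pos (show j < i + 1 by omega), if_pos hji]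
      cases hr : pvRight LIST j with
      | none => rfl
      | some r =>
        have hri : r ≠ i := fun h => hne (h ▸ hr)
        show (if r < i + 1 then pvCombine LIST (pvLeft LIST j) (some r)
              else pvLopt (pvLeft LIST j))
            = (if r < i then pvCombine LIST (pvLeft LIST j) (some r)
              else pvLopt (pvLeft LIST j))
        by_cases h2 : r < i
        · rw [if_pos h2, if_pos (by omega)]
        · rw [if_neg h2, if_neg (by omega)]
    · unfold pvFpre
      rw [if_neg (show ¬ j < i + 1 by omega), if_neg hji]
  have hpop' : pvPopWhile LIST i (pvS LIST i) =
      (((pvS LIST i).takeWhile (pvC LIST i)).getLast?,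
        (pvS LIST i).dropWhile (pvC LIST i)) := popWhile_eq LIST i (pvS LIST i)
  simp only [pvStep]
  rw [hpop']
  have hgetpar : ∀ (k j : Nat) (h1 : j < LIST.length) (h2 : j < (pvPar LIST k).length),
      (pvPar LIST k)[j] = pvFpre LIST k j := by
    intro k j h1 h2
    simp [pvPar]
  rcases hgl : ((pvS LIST i).takeWhile (pvC LIST i)).getLast? with _ | p <;>
    rcases hd : ((pvS LIST i).dropWhile (pvC LIST i)) with _ | ⟨t, rest⟩
  case none.nil =>
    have htwnil : (pvS LIST i).takeWhile (pvC LIST i) = [] := List.getLast?_eq_none_iff.1 hgl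
    have hnR : ∀ j, pvRight LIST j ≠ some i := by
      intro j h
      have := (hpopped j).2 h
      rw [htwnil] at this
      cases this
    rw [Prod.mk.injEq]
    refine ⟨?_, ?_⟩
    · show pvPar LIST i = pvPar LIST (i + 1)
      refine List.ext_getElem (by simp [pvPar]) ?_
      intro j h1 h2
      have hjn : j < LIST.length := by simpa [pvPar] using h1
      rw [hgetpar i j hjn h1, hgetpar (i + 1) j hjn h2]
      by_cases hji : j = i
      · subst hji
        rw [hP1, hd]
        simp [pvFpre]
      · exact (hP5 j hji (hnR j)).symm
    · show i :: ([] : List Nat) = pvS LIST (i + 1)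
      rw [hS1, hd]
  case none.cons =>
    have htwnil : (pvS LIST i).takeWhile (pvC LIST i) = [] := List.getLast?_eq_none_iff.1 hgl
    have hnR : ∀ j, pvRight LIST j ≠ some i := by
      intro j h
      have := (hpopped j).2 h
      rw [htwnil] at this
      cases this
    rw [Prod.mk.injEq]
    refine ⟨?_, ?_⟩
    · show (pvPar LIST i).set i ((t : Nat) : Int) = pvPar LIST (i + 1)
      refine List.ext_getElem (by simp [pvPar]) ?_
      intro j h1 h2
      have hjn : j < LIST.length := by simpa [pvPar] using h2
      rw [List.getElem_set, hgetpar (i + 1) j hjn h2]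
      by_cases hji : i = j
      · rw [if_pos hji]
        subst hji
        rw [hP1, hd]
      · rw [if_neg hji, hgetpar i j hjn (by simpa [pvPar] using hjn)]
        exact (hP5 j (fun h => hji h.symm) (hnR j)).symm
    · show i :: t :: rest = pvS LIST (i + 1)
      rw [hS1, hd]
  case some.nil =>
    have hptw : p ∈ (pvS LIST i).takeWhile (pvC LIST i) := List.mem_of_getLast? hgl
    have hpi : p < i := ((mem_pvS LIST i p).1 (htwmem p hptw).1).1
    rw [Prod.mk.injEq]
    refine ⟨?_, ?_⟩
    · show (pvPar LIST i).set p (i : Int) = pvPar LIST (i + 1)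
      refine List.ext_getElem (by simp [pvPar]) ?_
      intro j h1 h2
      have hjn : j < LIST.length := by simpa [pvPar] using h2
      rw [List.getElem_set, hgetpar (i + 1) j hjn h2]
      by_cases hjp : p = j
      · rw [if_pos hjp]
        subst hjp
        exact (hP3 p hgl).symm
      · rw [if_neg hjp, hgetpar i j hjn (by simpa [pvPar] using hjn)]
        by_cases hji : j = i
        · subst hji
          rw [hP1, hd]
          simp [pvFpre]
        · by_cases hR : pvRight LIST j = some i
          · refine (hP4 j ((hpopped j).2 hR) ?_).symm
            intro hcon
            rw [hgl] at hcon
            exact hjp (Option.some.inj hcon)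
          · exact (hP5 j hji hR).symm
    · show i :: ([] : List Nat) = pvS LIST (i + 1)
      rw [hS1, hd]
  case some.cons =>
    have hptw : p ∈ (pvS LIST i).takeWhile (pvC LIST i) := List.mem_of_getLast? hgl
    have hpi : p < i := ((mem_pvS LIST i p).1 (htwmem p hptw).1).1
    rw [Prod.mk.injEq]
    refine ⟨?_, ?_⟩
    · show ((pvPar LIST i).set p (i : Int)).set i ((t : Nat) : Int) = pvPar LIST (i + 1)
      refine List.ext_getElem (by simp [pvPar]) ?_
      intro j h1 h2
      have hjn : j < LIST.length := by simpa [pvPar] using h2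
      rw [List.getElem_set, List.getElem_set, hgetpar (i + 1) j hjn h2]
      by_cases hji : i = j
      · rw [if_pos hji]
        subst hji
        rw [hP1, hd]
      · rw [if_neg hji]
        by_cases hjp : p = j
        · rw [if_pos hjp]
          subst hjp
          exact (hP3 p hgl).symm
        · rw [if_neg hjp, hgetpar i j hjn (by simpa [pvPar] using hjn)]
          by_cases hR : pvRight LIST j = some i
          · refine (hP4 j ((hpopped j).2 hR) ?_).symm
            intro hcon
            rw [hgl] at hcon
            exact hjp (Option.some.inj hcon)
          · exact (hP5 j (fun h => hji h.symm) hR).symm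
    · show i :: t :: rest = pvS LIST (i + 1)
      rw [hS1, hd]

lemma fold_spec (LIST : List Int) : ∀ i ≤ LIST.length,
    (List.range i).foldl (pvStep LIST) (List.replicate LIST.length (-1), []) =
      (pvPar LIST i, pvS LIST i) := by
  intro i hi
  induction i with
  | zero =>
    rw [Prod.mk.injEq]
    constructor
    · unfold pvPar pvFpre
      simp
    · rfl
  | succ i ih =>
    rw [List.range_succ, List.foldl_append, ih (by omega)]
    exact step_spec LIST i (by omega)

-- ===== VERDICT (by name: the statement is the Claim_ definition above) =====
theorem cartesian_tree_spec : Claim_equal_cartesian_tree := by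
  unfold Claim_equal_cartesian_tree
  intro LIST _
  unfold Spec_cartesian_tree cartesian_tree
  rw [fold_spec LIST LIST.length le_rfl]
  show pvPar LIST LIST.length = cartesian_tree_alt LIST
  unfold pvPar cartesian_tree_alt
  refine List.map_congr_left ?_
  intro j hj
  simp only [List.mem_range] at hj
  unfold pvFpre
  rw [if_pos hj]
  cases hr : pvRight LIST j with
  | none =>
    cases pvLeft LIST j <;> rfl
  | some r =>
    have hrn : r < LIST.length := by
      have := List.mem_of_find?_eq_some hr
      simp only [List.mem_range'_1] at this
      omega
    show (if r < LIST.length then pvCombine LIST (pvLeft LIST j) (some r)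
        else pvLopt (pvLeft LIST j)) = pvCombine LIST (pvLeft LIST j) (some r)
    rw [if_pos hrn]
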